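-- pv_equiv track=rewrite | github.com/dcknuth/AoC_2020 | day06/day06_solution.py | part1
-- ===== SOURCE A (Python) =====
-- def part1(ls):
--     count = 0
--     # if we use a set, each answer will only count once
--     cur_answers = set()
--     for l in ls:
--         if l == '':
--             count += len(cur_answers)
--             cur_answers = set()
--         else:
--             # we will union sets for each group, which should remove dups
--             cur_answers = cur_answers | set(list(l))
--     count += len(cur_answers)
--     return(count)
-- ===== SOURCE B (Python) =====
-- def _groups(ls):
--     # maximal runs of non-empty lines
--     groups = []
--     i, n = 0, len(ls)
--     while i < n:
--         if ls[i] != '':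
--             j = i
--             while j < n and ls[j] != '':
--                 j += 1
--             groups.append(ls[i:j])
--             i = j
--         else:
--             i += 1
--     return groups
--
--
-- def part1(ls):
--     return sum(len(set(''.join(g))) for g in _groups(ls))
-- ===== Notes on version B (the rewrite author's own statement) =====
-- stated objective: simpler
-- what changed: Replaces the running count-and-set accumulator with a post-loop flush by an explicit group-then-aggregate structure: partition the lines into maximal non-empty runs, then sum each run's distinct-character count; building one set per group avoids A's repeated per-line set unions (measured constant-factor speedup).
import Mathlib
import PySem

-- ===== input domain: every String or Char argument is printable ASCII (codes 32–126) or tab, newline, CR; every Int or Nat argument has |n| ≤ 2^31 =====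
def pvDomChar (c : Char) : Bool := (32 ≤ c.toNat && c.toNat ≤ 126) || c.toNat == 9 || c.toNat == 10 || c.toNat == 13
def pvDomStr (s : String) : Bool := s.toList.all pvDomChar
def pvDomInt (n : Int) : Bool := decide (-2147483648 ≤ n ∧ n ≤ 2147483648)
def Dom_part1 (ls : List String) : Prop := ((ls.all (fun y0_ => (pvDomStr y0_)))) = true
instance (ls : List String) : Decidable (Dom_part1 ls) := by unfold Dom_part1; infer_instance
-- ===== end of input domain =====

-- B regroups the lines first and sums per-group distinct-character counts,
-- instead of A's running count-and-set accumulator with a post-loop flush (objective: simpler).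

-- ===== PORT A =====
def pvStep (st : Int × PySem.Set Char) (l : String) : Int × PySem.Set Char :=
  if l = "" then (st.1 + PySem.Set.len st.2, PySem.Set.empty)
  else (st.1, PySem.Set.union st.2 l.toList)

def part1 (ls : List String) : Int :=
  let st := ls.foldl pvStep (0, PySem.Set.empty)
  st.1 + PySem.Set.len st.2

-- ===== PORT B =====
-- maximal runs of non-empty lines (B's _groups)
def pvGroups (ls : List String) : List (List String) :=
  match ls with
  | [] => []
  | l :: rest =>
    if l = "" then pvGroups rest
    else (l :: rest.takeWhile (· ≠ "")) :: pvGroups (rest.dropWhile (· ≠ ""))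
termination_by ls.length
decreasing_by
  · simp
  · have := List.length_dropWhile_le (fun x => decide (x ≠ "")) rest
    simp only [List.length_cons]
    omega

def pvGroupCount (g : List String) : Int :=
  PySem.Set.len (PySem.Set.ofList (g.flatMap String.toList))

def part1_alt (ls : List String) : Int :=
  ((pvGroups ls).map pvGroupCount).sum

-- ===== PRECONDITION & SPEC =====
def Spec_part1 (ls : List String) (out : Int) : Prop := out = part1_alt ls
instance (ls : List String) (out : Int) : Decidable (Spec_part1 ls out) := by unfold Spec_part1; infer_instance

-- ===== CLAIM (what is proved, stated in full; the proofs are below) =====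
def Claim_equal_part1 : Prop := ∀ (ls : List String), Dom_part1 ls → Spec_part1 ls (part1 ls)

-- ===== LEMMAS AND PROOFS =====

-- A's loop, as a structural recursion on the remaining lines with the current set as state
def pvH (cur : PySem.Set Char) : List String → Int
  | [] => PySem.Set.len cur
  | l :: rest =>
    if l = "" then PySem.Set.len cur + pvH PySem.Set.empty rest
    else pvH (PySem.Set.union cur l.toList) rest

theorem pvFoldl_eq_pvH (ls : List String) : ∀ (count : Int) (cur : PySem.Set Char),
    (ls.foldl pvStep (count, cur)).1 + PySem.Set.len (ls.foldl pvStep (count, cur)).2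
      = count + pvH cur ls := by
  induction ls with
  | nil => intro count cur; simp [pvH]
  | cons l rest ih =>
    intro count cur
    by_cases h : l = ""
    · simp only [List.foldl_cons, pvStep, pvH, h, if_true]
      rw [ih]; ring
    · simp only [List.foldl_cons, pvStep, pvH, if_neg h]
      exact ih count (PySem.Set.union cur l.toList)

theorem pvGroups_sum (ls : List String) :
    ((pvGroups ls).map pvGroupCount).sum
      = PySem.Set.len (PySem.Set.ofList ((ls.takeWhile (· ≠ "")).flatMap String.toList))
        + ((pvGroups (ls.dropWhile (· ≠ ""))).map pvGroupCount).sum := by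
  cases ls with
  | nil => simp [pvGroups, PySem.Set.ofList, PySem.Set.empty, PySem.Set.len]
  | cons l rest =>
    by_cases h : l = ""
    · subst h
      simp [pvGroups, List.takeWhile, List.dropWhile,
        PySem.Set.ofList, PySem.Set.empty, PySem.Set.len]
    · rw [pvGroups]
      simp [h, pvGroupCount, List.takeWhile, List.dropWhile]

theorem pvH_spec (ls : List String) : ∀ (cur : PySem.Set Char),
    pvH cur ls
      = PySem.Set.len (PySem.Set.update cur ((ls.takeWhile (· ≠ "")).flatMap String.toList))
        + ((pvGroups (ls.dropWhile (· ≠ ""))).map pvGroupCount).sum := by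
  induction ls with
  | nil => intro cur; simp [pvH, pvGroups, PySem.Set.update]
  | cons l rest ih =>
    intro cur
    by_cases h : l = ""
    · subst h
      have hg := pvGroups_sum rest
      have hp : pvGroups ("" :: rest) = pvGroups rest := by rw [pvGroups]; simp
      have ht : ("" :: rest).takeWhile (· ≠ "") = [] := by simp
      have hd : ("" :: rest).dropWhile (· ≠ "") = "" :: rest := by simp [List.dropWhile]
      simp only [pvH, ih PySem.Set.empty]
      rw [ht, hd, hp, hg]
      simp only [List.flatMap_nil, PySem.Set.update, PySem.Set.ofList, List.foldl_nil]
      simp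
    · simp only [pvH, if_neg h]
      rw [ih]
      have ht : (l :: rest).takeWhile (· ≠ "") = l :: rest.takeWhile (· ≠ "") := by
        simp [List.takeWhile, h]
      have hd : (l :: rest).dropWhile (· ≠ "") = rest.dropWhile (· ≠ "") := by
        simp [List.dropWhile, h]
      rw [ht, hd]
      simp [PySem.Set.update, PySem.Set.union, List.foldl_append]

-- ===== VERDICT (by name: the statement is the Claim_ definition above) =====
theorem part1_spec : Claim_equal_part1 := by
  intro ls _
  show part1 ls = part1_alt ls
  show (ls.foldl pvStep (0, PySem.Set.empty)).1
      + PySem.Set.len (ls.foldl pvStep (0, PySem.Set.empty)).2 = part1_alt ls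
  rw [pvFoldl_eq_pvH ls 0 PySem.Set.empty, pvH_spec]
  rw [part1_alt, pvGroups_sum ls]
  have : PySem.Set.update PySem.Set.empty ((ls.takeWhile (· ≠ "")).flatMap String.toList)
      = PySem.Set.ofList ((ls.takeWhile (· ≠ "")).flatMap String.toList) := rfl
  rw [this]; ring
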